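-- pv_equiv track=rewrite | github.com/alpha-1-design/Nexus | nexus/orchestrator/executor.py | is_structured_task
-- ===== SOURCE A (Python) =====
-- TASK_KEYWORDS = [
--     "create", "write", "make file", "build", "generate",
--     "fix", "bug", "error", "crash", "patch",
--     "analyze", "audit", "review", "assess",
--     "test", "run tests", "testing",
--     "deploy", "release", "publish",
--     "refactor", "rename", "move", "copy",
--     "install", "setup", "configure",
--     "debug", "troubleshoot",
-- ]
--
-- NEEDS_TOOLS_KEYWORDS = [
--     "write", "create file", "edit", "modify", "delete file",
--     "run", "execute", "bash", "command",
--     "read", "list files", "search", "grep", "find",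
--     "build", "compile", "test",
-- ]
--
-- def is_structured_task(user_input: str) -> bool:
--     """Detect if a task requires structured execution (not just chat)."""
--     text = user_input.lower()
--
--     for keyword in TASK_KEYWORDS:
--         if keyword in text:
--             return True
--
--     for keyword in NEEDS_TOOLS_KEYWORDS:
--         if keyword in text:
--             return True
--
--     return False
-- ===== SOURCE B (Python) =====
-- TASK_KEYWORDS = [
--     "create", "write", "make file", "build", "generate",
--     "fix", "bug", "error", "crash", "patch",
--     "analyze", "audit", "review", "assess",
--     "test", "run tests", "testing",
--     "deploy", "release", "publish",
--     "refactor", "rename", "move", "copy",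
--     "install", "setup", "configure",
--     "debug", "troubleshoot",
-- ]
--
-- NEEDS_TOOLS_KEYWORDS = [
--     "write", "create file", "edit", "modify", "delete file",
--     "run", "execute", "bash", "command",
--     "read", "list files", "search", "grep", "find",
--     "build", "compile", "test",
-- ]
--
-- ALL_KEYWORDS = TASK_KEYWORDS + NEEDS_TOOLS_KEYWORDS
--
-- def is_structured_task(user_input: str) -> bool:
--     """Detect if a task requires structured execution (not just chat)."""
--     text = user_input.lower()
--     for i in range(len(text)):
--         if any(text.startswith(k, i) for k in ALL_KEYWORDS):
--             return True
--     return False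
-- ===== Notes on version B (the rewrite author's own statement) =====
-- stated objective: alternative
-- what changed: B scans the lowered text position by position, testing at each position whether any keyword starts there, instead of A's keyword-major sequence of ~45 independent substring searches over the whole text.
import Mathlib
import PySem

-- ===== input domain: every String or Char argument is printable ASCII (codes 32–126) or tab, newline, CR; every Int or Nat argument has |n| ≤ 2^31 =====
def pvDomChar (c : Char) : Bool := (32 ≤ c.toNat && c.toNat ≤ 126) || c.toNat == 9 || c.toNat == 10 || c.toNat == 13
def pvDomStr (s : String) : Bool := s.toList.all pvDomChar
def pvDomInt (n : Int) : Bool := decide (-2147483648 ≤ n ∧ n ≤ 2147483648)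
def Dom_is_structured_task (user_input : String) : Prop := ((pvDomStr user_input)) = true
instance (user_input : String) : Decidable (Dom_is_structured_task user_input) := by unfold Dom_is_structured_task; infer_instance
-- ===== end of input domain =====

-- B replaces A's keyword-major loop of ~45 whole-text substring searches by one
-- position-major scan of the lowered text, testing at each position whether any
-- keyword starts there (objective: alternative traversal, same asymptotic cost).

-- ===== PORT A =====
def taskKeywords : List String := [
  "create", "write", "make file", "build", "generate",
  "fix", "bug", "error", "crash", "patch",
  "analyze", "audit", "review", "assess",
  "test", "run tests", "testing",
  "deploy", "release", "publish",
  "refactor", "rename", "move", "copy",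
  "install", "setup", "configure",
  "debug", "troubleshoot"]

def needsToolsKeywords : List String := [
  "write", "create file", "edit", "modify", "delete file",
  "run", "execute", "bash", "command",
  "read", "list files", "search", "grep", "find",
  "build", "compile", "test"]

-- 'for keyword in kws: if keyword in text: return True' (falls through to the caller's next statement)
def kwLoop (kws : List String) (text : String) : Bool :=
  match kws with
  | [] => false
  | k :: rest => if PySem.Str.isIn k text then true else kwLoop rest text

def is_structured_task (user_input : String) : Bool :=
  let text := PySem.Str.lower user_input
  if kwLoop taskKeywords text then true
  else if kwLoop needsToolsKeywords text then true
  else false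

-- ===== PORT B =====
def allKeywords : List String := taskKeywords ++ needsToolsKeywords

-- 'for i in range(len(text)): if any(text.startswith(k, i) for k in ALL_KEYWORDS): return True'
-- recursion on the suffix text.drop i
def posScan (cs : List Char) : Bool :=
  match cs with
  | [] => false
  | c :: rest =>
    if allKeywords.any (fun k => PySem.Chars.startswith (c :: rest) k.toList) then true
    else posScan rest

def is_structured_task_alt (user_input : String) : Bool :=
  posScan (PySem.Str.lower user_input).toList

-- ===== PRECONDITION & SPEC =====
def Spec_is_structured_task (user_input : String) (out : Bool) : Prop := out = is_structured_task_alt user_input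
instance (user_input : String) (out : Bool) : Decidable (Spec_is_structured_task user_input out) := by unfold Spec_is_structured_task; infer_instance

-- ===== CLAIM (what is proved, stated in full; the proofs are below) =====
def Claim_equal_is_structured_task : Prop := ∀ (user_input : String), Dom_is_structured_task user_input → Spec_is_structured_task user_input (is_structured_task user_input)

-- ===== LEMMAS AND PROOFS =====

-- A's loop is an 'any' over its keyword list
theorem kwLoop_eq_any (kws : List String) (text : String) :
    kwLoop kws text = kws.any (fun k => PySem.Str.isIn k text) := by
  induction kws with
  | nil => rfl
  | cons k rest ih =>
    simp [kwLoop, ih]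

-- B's scan is true iff some keyword starts at some position
theorem posScan_iff (cs : List Char) :
    posScan cs = true ↔ ∃ j, allKeywords.any (fun k => PySem.Chars.startswith (cs.drop j) k.toList) = true := by
  induction cs with
  | nil =>
    constructor
    · intro h; exact Bool.noConfusion h
    · rintro ⟨j, hj⟩
      rw [List.drop_nil] at hj
      exact absurd hj (by decide)
  | cons c rest ih =>
    by_cases h : allKeywords.any (fun k => PySem.Chars.startswith (c :: rest) k.toList) = true
    · rw [posScan, if_pos h]
      simp only [true_iff]
      exact ⟨0, h⟩
    · rw [posScan, if_neg h, ih]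
      constructor
      · rintro ⟨j, hj⟩; exact ⟨j + 1, hj⟩
      · rintro ⟨j, hj⟩
        match j with
        | 0 => exact absurd hj h
        | j + 1 => exact ⟨j, hj⟩

theorem both_iff (text : String) :
    (allKeywords.any (fun k => PySem.Str.isIn k text) = true) ↔ posScan text.toList = true := by
  rw [posScan_iff]
  simp only [List.any_eq_true, PySem.Chars.startswith_iff]
  constructor
  · rintro ⟨k, hk, hin⟩
    rw [PySem.Str.isIn_iff_infix] at hin
    obtain ⟨j, hj⟩ := (PySem.Chars.exists_prefix_drop_iff_isIn k.toList text.toList).mpr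
      (PySem.Chars.isIn_iff_infix k.toList text.toList |>.mpr hin)
    exact ⟨j, k, hk, hj⟩
  · rintro ⟨j, k, hk, hj⟩
    refine ⟨k, hk, ?_⟩
    rw [PySem.Str.isIn_iff_infix, ← PySem.Chars.isIn_iff_infix]
    exact (PySem.Chars.exists_prefix_drop_iff_isIn k.toList text.toList).mp ⟨j, hj⟩

-- ===== VERDICT (by name: the statement is the Claim_ definition above) =====
theorem is_structured_task_spec : Claim_equal_is_structured_task := by
  intro user_input _
  unfold Spec_is_structured_task is_structured_task is_structured_task_alt
  simp only [kwLoop_eq_any]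
  have h := both_iff (PySem.Str.lower user_input)
  rw [allKeywords, List.any_append] at h
  have heq := Bool.coe_iff_coe.mp h
  rw [← heq]
  cases taskKeywords.any (fun k => PySem.Str.isIn k (PySem.Str.lower user_input)) <;>
    cases needsToolsKeywords.any (fun k => PySem.Str.isIn k (PySem.Str.lower user_input)) <;> rfl
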